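-- pv_equiv track=rewrite | github.com/Medigone/Aures-CRM | aurescrm/aures_crm/page/planning_charge_machines/planning_charge_machines.py | _deduplicate_jobs
-- ===== SOURCE A (Python) =====
-- def _deduplicate_jobs(jobs: list[dict]) -> list[dict]:
-- 	"""Garde au plus une ligne par demande de faisabilité : l'étude technique prime sur la faisabilité."""
-- 	demandes_any = set()
-- 	for j in jobs:
-- 		if j["source_key"] == "technique" and j.get("demande_faisabilite"):
-- 			demandes_any.add(j["demande_faisabilite"])
-- 	return [
-- 		j
-- 		for j in jobs
-- 		if not (j["source_key"] == "faisabilite" and j.get("demande_faisabilite") in demandes_any)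
-- 	]
-- ===== SOURCE B (Python) =====
-- def _deduplicate_jobs(jobs: list[dict]) -> list[dict]:
-- 	"""Garde au plus une ligne par demande de faisabilité : l'étude technique prime sur la faisabilité."""
-- 	# Group (index, source_key) pairs by demande_faisabilite, then drop, per group
-- 	# holding a technique row under a truthy demande, its faisabilite rows.
-- 	groups = {}
-- 	for i, j in enumerate(jobs):
-- 		groups.setdefault(j.get("demande_faisabilite"), []).append((i, j["source_key"]))
-- 	dropped = set()
-- 	for d, rows in groups.items():
-- 		if d and any(sk == "technique" for _, sk in rows):
-- 			dropped.update(i for i, sk in rows if sk == "faisabilite")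
-- 	return [j for i, j in enumerate(jobs) if i not in dropped]
-- ===== Notes on version B (the rewrite author's own statement) =====
-- stated objective: alternative
-- what changed: Instead of A's set of truthy technique demandes + predicate filter, B groups (index, source_key) pairs by demande_faisabilite into a dict of buckets, derives a set of dropped row indices from the buckets that hold a technique row under a truthy key, and rebuilds the list by index.
import Mathlib
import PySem

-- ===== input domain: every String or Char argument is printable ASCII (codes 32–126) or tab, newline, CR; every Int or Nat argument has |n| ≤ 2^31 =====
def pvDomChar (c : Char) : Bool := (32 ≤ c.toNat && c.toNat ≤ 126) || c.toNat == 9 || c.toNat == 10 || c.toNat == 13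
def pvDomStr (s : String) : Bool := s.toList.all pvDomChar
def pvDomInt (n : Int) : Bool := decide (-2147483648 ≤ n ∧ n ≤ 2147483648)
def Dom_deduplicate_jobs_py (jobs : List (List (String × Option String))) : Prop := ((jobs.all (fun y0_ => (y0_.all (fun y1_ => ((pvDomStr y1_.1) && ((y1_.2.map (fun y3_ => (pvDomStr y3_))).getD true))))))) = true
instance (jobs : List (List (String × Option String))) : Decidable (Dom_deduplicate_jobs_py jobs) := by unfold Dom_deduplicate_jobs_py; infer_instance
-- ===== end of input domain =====

-- B replaces A's set-of-demandes + predicate filter by grouping (index, source_key) pairs into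
-- buckets per demande_faisabilite, computing a set of dropped indices, and rebuilding by index
-- (alternative decomposition, not faster).

-- ===== PORT A =====
-- shared dict-access primitive: j.get(k) / j[k], collapsing "missing" and an explicit None to none
-- (Pre_ excludes jobs without "source_key", which is exactly where j["source_key"] raises KeyError)
def pvJGet (j : List (String × Option String)) (k : String) : Option String :=
  ((j.find? (fun p => p.1 == k)).map Prod.snd).join

-- Python truthiness of a str-or-None value
def pvTruthy : Option String → Bool
  | none => false
  | some s => s != ""

def deduplicate_jobs_py (jobs : List (List (String × Option String))) : List (List (String × Option String)) :=
  let demandes_any : PySem.Set (Option String) :=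
    jobs.foldl (fun s j =>
      if pvJGet j "source_key" == some "technique" && pvTruthy (pvJGet j "demande_faisabilite")
      then PySem.Set.add s (pvJGet j "demande_faisabilite") else s) PySem.Set.empty
  jobs.filter (fun j =>
    !(pvJGet j "source_key" == some "faisabilite"
      && PySem.Set.contains demandes_any (pvJGet j "demande_faisabilite")))

-- ===== PORT B =====
def deduplicate_jobs_py_alt (jobs : List (List (String × Option String))) : List (List (String × Option String)) :=
  let groups : PySem.Dict (Option String) (List (Int × Option String)) :=
    (PySem.List.enumerate jobs).foldl
      (fun g p => g.modify (pvJGet p.2 "demande_faisabilite") []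
        (· ++ [(p.1, pvJGet p.2 "source_key")])) PySem.Dict.empty
  let dropped : PySem.Set Int :=
    groups.items.foldl (fun s pr =>
      if pvTruthy pr.1 && pr.2.any (fun q => q.2 == some "technique")
      then pr.2.foldl (fun s q =>
             if q.2 == some "faisabilite" then PySem.Set.add s q.1 else s) s
      else s) PySem.Set.empty
  ((PySem.List.enumerate jobs).filter (fun p => !PySem.Set.contains dropped p.1)).map (·.2)

-- ===== PRECONDITION & SPEC =====
-- Pre_ excludes exactly the jobs lacking a "source_key" entry, on which Python A (and B) raise KeyError.
def Pre_deduplicate_jobs_py (jobs : List (List (String × Option String))) : Prop :=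
  ∀ j ∈ jobs, "source_key" ∈ j.map Prod.fst
instance (jobs : List (List (String × Option String))) : Decidable (Pre_deduplicate_jobs_py jobs) := by unfold Pre_deduplicate_jobs_py; infer_instance

def pvWitness_deduplicate_jobs_py : (List (List (String × Option String))) :=
  [[("source_key", some "technique"), ("demande_faisabilite", some "D1")],
   [("source_key", some "faisabilite"), ("demande_faisabilite", some "D1")],
   [("source_key", some "faisabilite"), ("demande_faisabilite", some "D2")]]

def Spec_deduplicate_jobs_py (jobs : List (List (String × Option String))) (out : List (List (String × Option String))) : Prop := out = deduplicate_jobs_py_alt jobs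
instance (jobs : List (List (String × Option String))) (out : List (List (String × Option String))) : Decidable (Spec_deduplicate_jobs_py jobs out) := by unfold Spec_deduplicate_jobs_py; infer_instance

-- ===== CLAIM (what is proved, stated in full; the proofs are below) =====
def Claim_equal_deduplicate_jobs_py : Prop := ∀ (jobs : List (List (String × Option String))), Dom_deduplicate_jobs_py jobs → Pre_deduplicate_jobs_py jobs → Spec_deduplicate_jobs_py jobs (deduplicate_jobs_py jobs)

-- ===== LEMMAS AND PROOFS =====
-- membership in a conditionally-built Set (both loops that add under a test)
lemma mem_foldl_add_if {α β : Type} [BEq β] [LawfulBEq β]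
    (l : List α) (p : α → Bool) (f : α → β) (s0 : PySem.Set β) (y : β) :
    (y ∈ l.foldl (fun s j => if p j then PySem.Set.add s (f j) else s) s0) ↔
      (y ∈ s0 ∨ ∃ j ∈ l, p j ∧ y = f j) := by
  induction l generalizing s0 with
  | nil => simp
  | cons a l ih =>
    simp only [List.foldl_cons, ih, List.mem_cons]
    by_cases hp : p a
    · simp only [hp, if_true, PySem.Set.mem_add]
      aesop
    · simp only [hp]
      aesop

-- membership in B's dropped set: nested fold over the buckets
lemma mem_dropped_fold {α γ β : Type} [BEq β] [LawfulBEq β]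
    (items : List (α × List γ)) (c : α × List γ → Bool) (p : γ → Bool) (f : γ → β)
    (s0 : PySem.Set β) (y : β) :
    (y ∈ items.foldl (fun s pr =>
        if c pr then pr.2.foldl (fun s q => if p q then PySem.Set.add s (f q) else s) s else s) s0) ↔
      (y ∈ s0 ∨ ∃ pr ∈ items, c pr ∧ ∃ q ∈ pr.2, p q ∧ y = f q) := by
  induction items generalizing s0 with
  | nil => simp
  | cons a l ih =>
    simp only [List.foldl_cons, ih, List.mem_cons]
    by_cases hc : c a
    · simp only [hc, if_true]
      rw [mem_foldl_add_if a.2 p f s0 y]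
      aesop
    · simp only [hc]
      aesop

-- the bucket of the group-by loop: (index, source_key) of the rows whose demande equals d, in order
def pvBucket (jobs : List (List (String × Option String))) (d : Option String) :
    List (Int × Option String) :=
  ((PySem.List.enumerate jobs).filter (fun p => pvJGet p.2 "demande_faisabilite" == d)).map
    (fun p => (p.1, pvJGet p.2 "source_key"))

def pvGroups (jobs : List (List (String × Option String))) :
    PySem.Dict (Option String) (List (Int × Option String)) :=
  (PySem.List.enumerate jobs).foldl
    (fun g p => g.modify (pvJGet p.2 "demande_faisabilite") []
      (· ++ [(p.1, pvJGet p.2 "source_key")])) PySem.Dict.empty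

def pvDropped (jobs : List (List (String × Option String))) : PySem.Set Int :=
  (pvGroups jobs).items.foldl (fun s pr =>
    if pvTruthy pr.1 && pr.2.any (fun q => q.2 == some "technique")
    then pr.2.foldl (fun s q =>
           if q.2 == some "faisabilite" then PySem.Set.add s q.1 else s) s
    else s) PySem.Set.empty

lemma groups_getD (jobs : List (List (String × Option String))) (d : Option String) :
    (pvGroups jobs).getD d [] = pvBucket jobs d := by
  unfold pvGroups
  have hmap : ((PySem.List.enumerate jobs).foldl
      (fun g p => g.modify (pvJGet p.2 "demande_faisabilite") []
        (· ++ [(p.1, pvJGet p.2 "source_key")])) PySem.Dict.empty)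
    = (((PySem.List.enumerate jobs).map
        (fun p => (pvJGet p.2 "demande_faisabilite", (p.1, pvJGet p.2 "source_key")))).foldl
      (fun g q => g.modify q.1 [] (· ++ [q.2])) PySem.Dict.empty) := by
    rw [List.foldl_map]
  rw [hmap]
  rw [PySem.Dict.getD_foldl_modify_append]
  simp only [pvBucket, List.filter_map, List.map_map, PySem.Dict.getD_empty, List.nil_append]
  rfl

lemma groups_nodup (jobs : List (List (String × Option String))) :
    (pvGroups jobs).keys.Nodup := by
  unfold pvGroups
  exact PySem.Dict.nodup_keys_foldl_modify_key _
    (fun (p : Int × List (String × Option String)) => pvJGet p.2 "demande_faisabilite") _ _ _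
    PySem.Dict.nodup_keys_empty

lemma groups_keys_mem (jobs : List (List (String × Option String))) (d : Option String) :
    d ∈ (pvGroups jobs).keys
    ↔ ∃ p : Int × List (String × Option String),
        p ∈ PySem.List.enumerate jobs ∧ pvJGet p.2 "demande_faisabilite" = d := by
  unfold pvGroups
  rw [PySem.Dict.keys_foldl_modify_key]
  simp [PySem.Set.mem_update, PySem.Dict.keys_empty, eq_comm]

lemma mem_bucket (jobs : List (List (String × Option String))) (d : Option String)
    (q : Int × Option String) :
    q ∈ pvBucket jobs d ↔ ∃ (k : Nat) (hk : k < jobs.length),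
      q = ((k : Int), pvJGet jobs[k] "source_key") ∧ pvJGet jobs[k] "demande_faisabilite" = d := by
  simp only [pvBucket, List.mem_map, List.mem_filter, PySem.List.mem_enumerate_iff]
  constructor
  · rintro ⟨p, ⟨⟨k, hk, rfl⟩, hkey⟩, rfl⟩
    refine ⟨k, hk, by simp, ?_⟩
    simpa using hkey
  · rintro ⟨k, hk, rfl, hkey⟩
    exact ⟨((k : Int), jobs[k]), ⟨⟨k, hk, by simp⟩, by simpa using hkey⟩, by simp⟩

lemma mem_items_groups (jobs : List (List (String × Option String)))
    (pr : Option String × List (Int × Option String)) :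
    pr ∈ (pvGroups jobs).items ↔ pr.1 ∈ (pvGroups jobs).keys ∧ pr.2 = pvBucket jobs pr.1 := by
  constructor
  · intro hm
    refine ⟨PySem.Dict.mem_keys_of_mem_items _ hm, ?_⟩
    have hgd := PySem.Dict.getD_of_mem_items (pvGroups jobs) (k := pr.1) (v := pr.2)
      (by simpa using hm) (groups_nodup jobs) []
    rw [← hgd]
    exact groups_getD jobs pr.1
  · rintro ⟨hk, hv⟩
    have hc : (pvGroups jobs).contains pr.1 = true := by
      rw [PySem.Dict.contains_iff_mem_keys]; exact hk
    rw [PySem.Dict.contains_eq_isSome_get?] at hc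
    obtain ⟨v, hv'⟩ := Option.isSome_iff_exists.mp hc
    have hveq : v = pvBucket jobs pr.1 := by
      have hg := PySem.Dict.getD_of_get?_eq_some (pvGroups jobs) [] hv'
      rw [← hg]
      exact groups_getD jobs pr.1
    have hmem := PySem.Dict.mem_items_of_get?_eq_some (pvGroups jobs) hv'
    rw [hveq, ← hv] at hmem
    exact hmem

lemma contains_dropped (jobs : List (List (String × Option String))) (k : Nat)
    (hk : k < jobs.length) :
    PySem.Set.contains (pvDropped jobs) (k : Int) =
      (pvJGet jobs[k] "source_key" == some "faisabilite" &&
       jobs.any (fun t => pvJGet t "source_key" == some "technique"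
         && pvTruthy (pvJGet t "demande_faisabilite")
         && (pvJGet t "demande_faisabilite" == pvJGet jobs[k] "demande_faisabilite"))) := by
  rw [Bool.eq_iff_iff, PySem.Set.contains_iff]
  unfold pvDropped
  rw [mem_dropped_fold]
  simp only [PySem.Set.empty, List.not_mem_nil, false_or, Bool.and_eq_true, beq_iff_eq,
    List.any_eq_true]
  constructor
  · rintro ⟨pr, hpr, ⟨htr, i, hi, hitech⟩, q, hq, hqfais, hqk⟩
    rw [mem_items_groups] at hpr
    obtain ⟨-, hbkt⟩ := hpr
    rw [hbkt] at hq hi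
    rw [mem_bucket] at hq hi
    obtain ⟨m, hm, hqv, hmkey⟩ := hq
    have hkd : pvJGet jobs[k] "demande_faisabilite" = pr.1 ∧
        q.2 = pvJGet jobs[k] "source_key" := by
      have hme : m = k := by
        rw [hqv] at hqk
        simp only [] at hqk
        exact_mod_cast hqk.symm
      subst hme
      exact ⟨hmkey, by rw [hqv]⟩
    obtain ⟨m', hm', rfl, hm'key⟩ := hi
    refine ⟨by rw [← hkd.2]; simpa using hqfais, jobs[m'], List.getElem_mem hm',
      ⟨by simpa using hitech, ?_⟩, ?_⟩
    · rw [hm'key]; exact htr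
    · rw [hm'key, ← hkd.1]
  · rintro ⟨hkfais, t, ht, ⟨httech, httr⟩, hteq⟩
    obtain ⟨m, hm, rfl⟩ := List.mem_iff_getElem.mp ht
    refine ⟨(pvJGet jobs[k] "demande_faisabilite",
             pvBucket jobs (pvJGet jobs[k] "demande_faisabilite")), ?_, ⟨?_, ?_⟩, ?_⟩
    · rw [mem_items_groups]
      refine ⟨?_, rfl⟩
      rw [groups_keys_mem]
      exact ⟨((k : Int), jobs[k]),
        (PySem.List.mem_enumerate_iff _ _ _).mpr ⟨k, hk, by simp⟩, rfl⟩
    · rw [← hteq]; exact httr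
    · exact ⟨((m : Int), pvJGet jobs[m] "source_key"),
        (mem_bucket jobs _ _).mpr ⟨m, hm, rfl, hteq⟩, by simpa using httech⟩
    · exact ⟨((k : Int), pvJGet jobs[k] "source_key"),
        (mem_bucket jobs _ _).mpr ⟨k, hk, rfl, rfl⟩, by simpa using hkfais, rfl⟩

-- A's set membership as a scan (used to line the two predicates up)
lemma contains_eq_any (jobs : List (List (String × Option String)))
    (j : List (String × Option String)) :
    PySem.Set.contains
      (jobs.foldl (fun s t =>
        if pvJGet t "source_key" == some "technique" && pvTruthy (pvJGet t "demande_faisabilite")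
        then PySem.Set.add s (pvJGet t "demande_faisabilite") else s) PySem.Set.empty)
      (pvJGet j "demande_faisabilite")
    = jobs.any (fun t =>
        pvJGet t "source_key" == some "technique"
        && pvTruthy (pvJGet t "demande_faisabilite")
        && pvJGet t "demande_faisabilite" == pvJGet j "demande_faisabilite") := by
  rw [Bool.eq_iff_iff, PySem.Set.contains_iff, mem_foldl_add_if]
  simp only [PySem.Set.empty, List.not_mem_nil, false_or, List.any_eq_true,
    Bool.and_eq_true, beq_iff_eq]
  constructor
  · rintro ⟨t, ht, hc, hy⟩
    exact ⟨t, ht, hc, hy.symm⟩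
  · rintro ⟨t, ht, ⟨h1, h2⟩, hy⟩
    exact ⟨t, ht, by simp [h1, h2], hy.symm⟩

lemma filter_enum_aux {α : Type} (xs : List α) (s : Int) (q : Int → Bool) (p : α → Bool)
    (h : ∀ (k : Nat) (hk : k < xs.length), q (s + k) = p xs[k]) :
    ((PySem.List.enumerate xs s).filter (fun pr => q pr.1)).map (·.2) = xs.filter p := by
  induction xs generalizing s with
  | nil => simp [PySem.List.enumerate_nil]
  | cons x xs ih =>
    rw [PySem.List.enumerate_cons]
    have h0 : q s = p x := by simpa using h 0 (by simp)
    have htail := ih (s + 1) (fun k hk => by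
      have hkk := h (k + 1) (by simpa using Nat.succ_lt_succ hk)
      push_cast at hkk
      rw [show s + 1 + (k : Int) = s + ((k : Int) + 1) from by ring]
      simpa using hkk)
    by_cases hq : p x
    · simp [h0, hq, htail]
    · simp [h0, hq, htail]

theorem main_eq (jobs : List (List (String × Option String))) :
    deduplicate_jobs_py jobs = deduplicate_jobs_py_alt jobs := by
  have halt : deduplicate_jobs_py_alt jobs
      = ((PySem.List.enumerate jobs).filter
          (fun p => !PySem.Set.contains (pvDropped jobs) p.1)).map (·.2) := rfl
  rw [halt]
  refine (filter_enum_aux jobs 0 (fun i => !PySem.Set.contains (pvDropped jobs) i) _ ?_).symm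
  intro k hk
  show (!PySem.Set.contains (pvDropped jobs) (0 + (k : Int))) = _
  rw [zero_add, contains_dropped jobs k hk, contains_eq_any jobs jobs[k]]

-- ===== VERDICT (by name: the statement is the Claim_ definition above) =====
theorem deduplicate_jobs_py_spec : Claim_equal_deduplicate_jobs_py := by
  intro jobs _ _
  unfold Spec_deduplicate_jobs_py
  exact main_eq jobs
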